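-- pv_equiv track=rewrite | github.com/s-haikuhi/Homework | HS_Les21_ex6.py | max_score_student
-- ===== SOURCE A (Python) =====
-- scores = [95, 65, 114, 80, 77, 100]
--
-- def max_score_student(students_list, scores_list):
--     my_dic = {}
--     students_with_scores = []
--     for i, j in zip(students_list, scores_list):
--         my_dic[i] = j
--         students_with_scores.append(my_dic)
--     students_tuple = tuple(students_with_scores)
--
--     max_score = scores[0]
--     student_with_high_score = {}
--
--     for j in students_tuple:
--         for k, v in j.items():
--             if v > max_score:
--                 student_with_high_score = {}
--                 max_score = v
--                 student_with_high_score[k] = v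
--     return student_with_high_score
-- ===== SOURCE B (Python) =====
-- scores = [95, 65, 114, 80, 77, 100]
--
-- def max_score_student(students_list, scores_list):
--     d = dict(zip(students_list, scores_list))
--     if not d:
--         return {}
--     k, v = max(d.items(), key=lambda kv: kv[1])
--     return {k: v} if v > scores[0] else {}
-- ===== Notes on version B (the rewrite author's own statement) =====
-- stated objective: faster
-- what changed: A builds a tuple of n aliases of one mutated dict and rescans that dict n times with a hand-rolled running-max loop; B builds the dict once with dict(zip(...)) and takes a single built-in max of its items by score, comparing it to the scores[0]=95 threshold.
import Mathlib
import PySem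

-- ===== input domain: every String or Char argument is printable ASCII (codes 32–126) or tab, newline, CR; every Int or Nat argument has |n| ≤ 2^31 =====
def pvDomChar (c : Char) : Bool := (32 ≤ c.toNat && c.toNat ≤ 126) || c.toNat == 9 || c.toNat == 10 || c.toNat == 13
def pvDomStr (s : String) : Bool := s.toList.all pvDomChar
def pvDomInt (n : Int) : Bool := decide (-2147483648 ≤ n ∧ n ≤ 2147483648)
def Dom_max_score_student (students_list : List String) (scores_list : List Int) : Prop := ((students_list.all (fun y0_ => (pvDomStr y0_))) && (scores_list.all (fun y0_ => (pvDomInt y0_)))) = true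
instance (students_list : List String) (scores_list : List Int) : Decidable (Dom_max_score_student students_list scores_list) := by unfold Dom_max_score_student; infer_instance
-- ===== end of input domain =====

-- B replaces A's alias-filled tuple and its n repeated scans of the dict by one dict plus a
-- single built-in max over its items (objective: faster, O(n^2) -> O(n), and simpler).

-- the module-level constant `scores` both versions read (only scores[0] matters)
def pvScoresConst : List Int := [95, 65, 114, 80, 77, 100]

-- ===== PORT A =====
-- NOTE on Python semantics: `students_with_scores.append(my_dic)` appends a REFERENCE to the
-- one dict being mutated, so after the loop the list holds `pairs.length` aliases of the FINAL
-- dict; the faithful value is `List.replicate pairs.length my_dic`.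
def max_score_student (students_list : List String) (scores_list : List Int) : List (String × Int) :=
  let pairs := students_list.zip scores_list
  let my_dic : PySem.Dict String Int :=
    pairs.foldl (fun d p => d.insert p.1 p.2) PySem.Dict.empty
  let students_tuple : List (PySem.Dict String Int) := List.replicate pairs.length my_dic
  let st :=
    students_tuple.foldl
      (fun st j =>
        j.items.foldl
          (fun st kv =>
            if kv.2 > st.1 then (kv.2, (PySem.Dict.empty : PySem.Dict String Int).insert kv.1 kv.2)
            else st)
          st)
      (PySem.List.pyGetD pvScoresConst 0 0, (PySem.Dict.empty : PySem.Dict String Int))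
  st.2.items

-- ===== PORT B =====
def max_score_student_alt (students_list : List String) (scores_list : List Int) : List (String × Int) :=
  let d : PySem.Dict String Int := PySem.Dict.ofList (students_list.zip scores_list)
  if d.size == 0 then []
  else
    match PySem.List.max? d.items (fun kv => kv.2) with
    | none => []   -- unreachable guard: d is nonempty here, Python's max does not raise
    | some kv => if kv.2 > PySem.List.pyGetD pvScoresConst 0 0 then [(kv.1, kv.2)] else []

-- ===== PRECONDITION & SPEC =====
def Spec_max_score_student (students_list : List String) (scores_list : List Int) (out : List (String × Int)) : Prop := out = max_score_student_alt students_list scores_list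
instance (students_list : List String) (scores_list : List Int) (out : List (String × Int)) : Decidable (Spec_max_score_student students_list scores_list out) := by unfold Spec_max_score_student; infer_instance

-- ===== CLAIM (what is proved, stated in full; the proofs are below) =====
def Claim_equal_max_score_student : Prop := ∀ (students_list : List String) (scores_list : List Int), Dom_max_score_student students_list scores_list → Spec_max_score_student students_list scores_list (max_score_student students_list scores_list)

-- ===== LEMMAS AND PROOFS =====

-- A's inner scan step
def pvStep (st : Int × PySem.Dict String Int) (kv : String × Int) : Int × PySem.Dict String Int :=
  if kv.2 > st.1 then (kv.2, (PySem.Dict.empty : PySem.Dict String Int).insert kv.1 kv.2) else st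

-- Python max's running update (the fold inside PySem.List.max?)
def pvGo (acc : Option (String × Int)) (y : String × Int) : Option (String × Int) :=
  match acc with | none => some y | some m => if m.2 < y.2 then some y else some m

theorem pv_max_eq (l : List (String × Int)) :
    PySem.List.max? l (fun kv => kv.2) = l.foldl pvGo none := by
  simp only [PySem.List.max?]
  congr 1
  funext acc y
  cases acc <;> rfl

theorem pv_max_fold (t : List (String × Int)) (x : String × Int) :
    t.foldl pvGo (some x)
      = match t.foldl pvGo none with
        | none => some x
        | some q => some (if x.2 < q.2 then q else x) := by
  induction t generalizing x with
  | nil => rfl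
  | cons y t ih =>
    have hcons : ∀ (a : Option (String × Int)), List.foldl pvGo a (y :: t) = List.foldl pvGo (pvGo a y) t := by
      intro a; rfl
    rw [hcons, hcons]
    have hx : pvGo (some x) y = some (if x.2 < y.2 then y else x) := by
      by_cases h : x.2 < y.2 <;> simp [pvGo, h]
    have hn : pvGo none y = some y := rfl
    rw [hx, hn, ih, ih y]
    cases hq : t.foldl pvGo none with
    | none => simp
    | some q =>
      by_cases h1 : y.2 < q.2 <;> by_cases h2 : x.2 < y.2 <;> by_cases h3 : x.2 < q.2 <;>
        simp [h1, h2, h3] <;> (exfalso; omega)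

-- one scan pass, characterised by the max? fold
theorem pv_pass (items : List (String × Int)) (s : Int × PySem.Dict String Int) :
    items.foldl pvStep s
      = match items.foldl pvGo none with
        | none => s
        | some p => if s.1 < p.2 then (p.2, (PySem.Dict.empty : PySem.Dict String Int).insert p.1 p.2) else s := by
  induction items generalizing s with
  | nil => rfl
  | cons x t ih =>
    rw [List.foldl_cons, ih]
    have hcons : List.foldl pvGo none (x :: t) = List.foldl pvGo (some x) t := rfl
    rw [hcons, pv_max_fold]
    cases hq : t.foldl pvGo none with
    | none =>
      by_cases hs : x.2 > s.1 <;> simp [pvStep, hs]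
    | some q =>
      by_cases hs : x.2 > s.1 <;> by_cases h1 : x.2 < q.2 <;> by_cases h2 : s.1 < q.2 <;>
        simp [pvStep, hs, h1, h2] <;> (exfalso; omega)

-- a pass from a state already dominating every value is the identity
theorem pv_pass_fixed (items : List (String × Int)) (s : Int × PySem.Dict String Int)
    (h : ∀ p ∈ items, p.2 ≤ s.1) : items.foldl pvStep s = s := by
  rw [pv_pass]
  cases hq : items.foldl pvGo none with
  | none => rfl
  | some p =>
    have hmem : p ∈ items := PySem.List.max?_mem (by rw [pv_max_eq]; exact hq)
    have := h p hmem
    simp only []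
    split_ifs with h1
    · omega
    · rfl

-- repeating the identical pass any positive number of times equals doing it once
theorem pv_replicate (d : PySem.Dict String Int) (n : Nat) (s : Int × PySem.Dict String Int) :
    (List.replicate (n + 1) d).foldl (fun st j => j.items.foldl pvStep st) s
      = d.items.foldl pvStep s := by
  induction n generalizing s with
  | zero => rfl
  | succ m ih =>
    rw [List.replicate_succ, List.foldl_cons, ih]
    apply pv_pass_fixed
    intro p hp
    rw [pv_pass]
    cases hq : d.items.foldl pvGo none with
    | none =>
      have : d.items = [] := (PySem.List.max?_eq_none_iff d.items (fun kv => kv.2)).mp (by rw [pv_max_eq]; exact hq)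
      rw [this] at hp
      exact absurd hp (List.not_mem_nil)
    | some q =>
      have hle := PySem.List.max?_isMax (by rw [pv_max_eq]; exact hq) p hp
      simp only [] at hle ⊢
      split_ifs with h1
      · exact hle
      · omega

-- ===== VERDICT (by name: the statement is the Claim_ definition above) =====
theorem max_score_student_spec : Claim_equal_max_score_student := by
  intro sl cl _
  show max_score_student sl cl = max_score_student_alt sl cl
  unfold max_score_student max_score_student_alt
  simp only []
  have hof : PySem.Dict.ofList (sl.zip cl)
      = (sl.zip cl).foldl (fun d p => d.insert p.1 p.2) PySem.Dict.empty := rfl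
  rw [hof]
  set pairs := sl.zip cl with hpairs
  set d : PySem.Dict String Int := pairs.foldl (fun d p => d.insert p.1 p.2) PySem.Dict.empty with hd
  have hstep : (fun (st : Int × PySem.Dict String Int) (kv : String × Int) =>
      if kv.2 > st.1 then (kv.2, (PySem.Dict.empty : PySem.Dict String Int).insert kv.1 kv.2) else st) = pvStep := by
    funext st kv; rfl
  cases hp : pairs with
  | nil =>
    simp [hp, hd]
    rfl
  | cons x rest =>
    simp only [List.length_cons, hstep]
    rw [pv_replicate d rest.length, pv_pass, pv_max_eq]
    cases hq : d.items.foldl pvGo none with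
    | none =>
      have hnil : d.items = [] := (PySem.List.max?_eq_none_iff d.items (fun kv => kv.2)).mp (by rw [pv_max_eq]; exact hq)
      simp [hnil, PySem.Dict.size]
      rfl
    | some q =>
      have hne : d.items ≠ [] := by
        intro h0
        have := (PySem.List.max?_eq_none_iff d.items (fun kv => kv.2)).mpr h0
        rw [pv_max_eq, hq] at this
        simp at this
      have hsz : (d.size == 0) = false := by
        simp [PySem.Dict.size, List.length_eq_zero_iff, hne]
      rw [hsz]
      simp only [Bool.false_eq_true, if_false]
      simp only [gt_iff_lt]
      by_cases h1 : PySem.List.pyGetD pvScoresConst 0 0 < q.2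
      · rw [if_pos h1, if_pos h1]
        rfl
      · rw [if_neg h1, if_neg h1]
        rfl
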